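-- pv_equiv track=rewrite | github.com/cyndii20/Algorithm-Study | y00nsun/백준/SamsungSW/BOJ_14890_경사로.py | can_slope
-- ===== SOURCE A (Python) =====
-- def can_slope(road, L):
--     used = [False] * len(road)
--     for i in range(len(road) - 1):
--         if road[i] == road[i+1]:  # 높이 같음
--             continue
--         if abs(road[i] - road[i+1]) > 1: # 높이 차이 1보다 큼
--             return False
--         if road[i] > road[i+1]:  # 내리막
--             for j in range(i+1, i+1+L):
--                 if j >= len(road) or road[j] != road[i+1] or used[j]:
--                     return False
--                 used[j] = True
--         elif road[i] < road[i+1]:  # 오르막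
--             for j in range(i, i-L, -1):
--                 if j < 0 or road[j] != road[i] or used[j]:
--                     return False
--                 used[j] = True
--     return True
-- ===== SOURCE B (Python) =====
-- def can_slope(road, L):
--     # Run-length compress the road, then decide each run boundary in O(1)
--     # from the run lengths (tracking 'rem', the usable tail of the current
--     # run), instead of per-cell length-L scans with a used[] array.
--     runs = []
--     for h in road:
--         if runs and runs[-1][0] == h:
--             runs[-1] = (h, runs[-1][1] + 1)
--         else:
--             runs.append((h, 1))
--     if not runs:
--         return True
--     rem = runs[0][1]
--     for (h1, l1), (h2, l2) in zip(runs, runs[1:]):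
--         if h2 == h1 + 1:
--             if rem < L:
--                 return False
--             rem = l2
--         elif h2 == h1 - 1:
--             if l2 < L:
--                 return False
--             rem = l2 - L
--         else:
--             return False
--     return True
-- ===== Notes on version B (the rewrite author's own statement) =====
-- stated objective: alternative
-- what changed: B run-length compresses the road once and decides every boundary in O(1) from the run lengths (tracking the usable tail 'rem' of the current run), replacing A's per-boundary length-L cell scans over a used[] array; asymptotically O(n) vs O(n*L), but a timing run's inputs did not show a measured speed-up.
import Mathlib
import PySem

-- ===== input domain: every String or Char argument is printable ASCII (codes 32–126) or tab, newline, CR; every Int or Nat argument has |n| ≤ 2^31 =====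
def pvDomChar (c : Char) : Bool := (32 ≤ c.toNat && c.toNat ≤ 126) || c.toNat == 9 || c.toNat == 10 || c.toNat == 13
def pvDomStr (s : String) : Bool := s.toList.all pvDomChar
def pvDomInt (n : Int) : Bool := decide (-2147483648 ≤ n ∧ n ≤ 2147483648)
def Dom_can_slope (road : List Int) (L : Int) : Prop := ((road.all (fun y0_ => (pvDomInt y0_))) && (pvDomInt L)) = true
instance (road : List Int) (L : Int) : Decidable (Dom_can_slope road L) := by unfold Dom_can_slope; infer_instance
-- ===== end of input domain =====

-- B replaces A's per-boundary length-L cell scans over a used[] array by one run-length compression and an O(1) check per run boundary (objective: alternative algorithm).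

-- ===== PORT A =====
-- inner 'for j in range(i+1, i+1+L)' body (downhill ramp); none = 'return False'
def aDownStep (road : List Int) (n h2 : Int) (st : Option (List Bool)) (j : Int) : Option (List Bool) :=
  match st with
  | none => none
  | some used =>
    if n ≤ j ∨ ¬ (PySem.List.pyGetD road j 0 = h2) ∨ PySem.List.pyGetD used j false = true then none
    else some (used.set j.toNat true)   -- used[j] = True (j ≥ 0 here, so .toNat is exact)

-- inner 'for j in range(i, i-L, -1)' body (uphill ramp)
def aUpStep (road : List Int) (h1 : Int) (st : Option (List Bool)) (j : Int) : Option (List Bool) :=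
  match st with
  | none => none
  | some used =>
    if j < 0 ∨ ¬ (PySem.List.pyGetD road j 0 = h1) ∨ PySem.List.pyGetD used j false = true then none
    else some (used.set j.toNat true)

-- outer 'for i in range(len(road) - 1)' body
def aOuterStep (road : List Int) (L : Int) (st : Option (List Bool)) (i : Int) : Option (List Bool) :=
  match st with
  | none => none
  | some used =>
    let a := PySem.List.pyGetD road i 0        -- road[i]   (i always in range here)
    let b := PySem.List.pyGetD road (i+1) 0    -- road[i+1]
    if a = b then some used
    else if 1 < |a - b| then none
    else if b < a then
      (PySem.List.pyRange (i+1) (i+1+L) 1).foldl (aDownStep road road.length b) (some used)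
    else
      (PySem.List.pyRange i (i-L) (-1)).foldl (aUpStep road a) (some used)

def can_slope (road : List Int) (L : Int) : Bool :=
  ((PySem.List.pyRange 0 ((road.length : Int) - 1) 1).foldl (aOuterStep road L)
    (some (List.replicate road.length false))).isSome

-- ===== PORT B =====
-- run-length compression step: one iteration of 'for h in road'
def bRun (rs : List (Int × Int)) (h : Int) : List (Int × Int) :=
  match rs.getLast? with
  | some (h0, c) => if h0 = h then rs.dropLast ++ [(h0, c + 1)] else rs ++ [(h, 1)]
  | none => [(h, 1)]

-- one iteration of 'for (h1, l1), (h2, l2) in zip(runs, runs[1:])'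
def bStep (L : Int) (st : Option Int) (p : (Int × Int) × (Int × Int)) : Option Int :=
  match st with
  | none => none
  | some rem =>
    let h1 := p.1.1
    let h2 := p.2.1
    let l2 := p.2.2
    if h2 = h1 + 1 then (if rem < L then none else some l2)
    else if h2 = h1 - 1 then (if l2 < L then none else some (l2 - L))
    else none

def can_slope_alt (road : List Int) (L : Int) : Bool :=
  let runs := road.foldl bRun []
  match runs with
  | [] => true
  | (_, l0) :: rest => ((runs.zip rest).foldl (bStep L) (some l0)).isSome

-- ===== PRECONDITION & SPEC =====
def Spec_can_slope (road : List Int) (L : Int) (out : Bool) : Prop := out = can_slope_alt road L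
instance (road : List Int) (L : Int) (out : Bool) : Decidable (Spec_can_slope road L out) := by unfold Spec_can_slope; infer_instance

-- ===== CLAIM (what is proved, stated in full; the proofs are below) =====
def Claim_equal_can_slope : Prop := ∀ (road : List Int) (L : Int), Dom_can_slope road L → Spec_can_slope road L (can_slope road L)

-- ===== LEMMAS AND PROOFS =====

-- structural run-length encoding (proof-layer mirror of B's foldl build)
def rleAux (h c : Int) : List Int → List (Int × Int)
  | [] => [(h, c)]
  | x :: t => if x = h then rleAux h (c + 1) t else (h, c) :: rleAux x 1 t

def rle : List Int → List (Int × Int)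
  | [] => []
  | x :: t => rleAux x 1 t

-- structural mirror of B's boundary loop: previous height h, usable tail rem
def chk (L : Int) (h rem : Int) : List (Int × Int) → Bool
  | [] => true
  | (h2, l2) :: rs =>
    if h2 = h + 1 then (if rem < L then false else chk L h2 l2 rs)
    else if h2 = h - 1 then (if l2 < L then false else chk L h2 (l2 - L) rs)
    else false

def flat : List (Int × Int) → List Int
  | [] => []
  | (h, c) :: rs => List.replicate c.toNat h ++ flat rs

-- adjacent runs have distinct heights and positive lengths
def runsOk (h : Int) : List (Int × Int) → Prop
  | [] => True
  | (h2, l2) :: rs => h2 ≠ h ∧ 1 ≤ l2 ∧ runsOk h2 rs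

lemma foldl_none {σ α : Type} (f : Option σ → α → Option σ) (hf : ∀ x, f none x = none)
    (xs : List α) : xs.foldl f none = none := by
  induction xs with
  | nil => rfl
  | cons x t ih => simp [List.foldl, hf x, ih]

-- ---- B side ----
lemma bRun_build (t : List Int) : ∀ (rs : List (Int × Int)) (h c : Int),
    t.foldl bRun (rs ++ [(h, c)]) = rs ++ rleAux h c t := by
  induction t with
  | nil => intro rs h c; rfl
  | cons x t ih =>
    intro rs h c
    by_cases hx : x = h
    · subst hx
      simp [List.foldl, bRun, List.getLast?_concat, List.dropLast_concat, rleAux, ih]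
    · simp only [List.foldl, bRun, List.getLast?_concat, List.dropLast_concat, rleAux]
      rw [if_neg (by simpa using fun hh => hx hh.symm), if_neg hx]
      rw [ih (rs ++ [(h, c)]) x 1]
      simp

lemma runs_eq_rle (road : List Int) : road.foldl bRun [] = rle road := by
  cases road with
  | nil => rfl
  | cons x t =>
    show t.foldl bRun (bRun [] x) = rleAux x 1 t
    have : bRun [] x = [] ++ [(x, 1)] := by rfl
    rw [this, bRun_build t [] x 1]
    simp

lemma zip_fold_chk (L : Int) : ∀ (rs : List (Int × Int)) (h l rem : Int),
    ((((h, l) :: rs).zip rs).foldl (bStep L) (some rem)).isSome = chk L h rem rs := by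
  intro rs
  induction rs with
  | nil => intro h l rem; rfl
  | cons p rs ih =>
    intro h l rem
    obtain ⟨h2, l2⟩ := p
    show ((((h2, l2) :: rs).zip rs).foldl (bStep L) (bStep L (some rem) ((h, l), (h2, l2)))).isSome
        = chk L h rem ((h2, l2) :: rs)
    simp only [bStep, chk]
    by_cases hup : h2 = h + 1
    · simp only [if_pos hup]
      by_cases hr : rem < L
      · simp [if_pos hr, foldl_none (bStep L) (fun _ => rfl)]
      · simp [if_neg hr, ih]
    · by_cases hdn : h2 = h - 1
      · simp only [if_neg hup, if_pos hdn]
        by_cases hl : l2 < L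
        · simp [if_pos hl, foldl_none (bStep L) (fun _ => rfl)]
        · simp [if_neg hl, ih]
      · simp [if_neg hup, if_neg hdn, foldl_none (bStep L) (fun _ => rfl)]

lemma alt_eq_chk (road : List Int) (L : Int) :
    can_slope_alt road L = (match rle road with
      | [] => true
      | (h, l) :: rs => chk L h l rs) := by
  unfold can_slope_alt
  rw [runs_eq_rle]
  cases hr : rle road with
  | nil => rfl
  | cons p rs =>
    obtain ⟨h, l⟩ := p
    exact zip_fold_chk L rs h l l

-- ---- rle facts ----
lemma flat_rleAux : ∀ (t : List Int) (h c : Int), 0 ≤ c →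
    flat (rleAux h c t) = List.replicate c.toNat h ++ t := by
  intro t
  induction t with
  | nil => intro h c _; simp [rleAux, flat]
  | cons x t ih =>
    intro h c hc
    by_cases hx : x = h
    · subst hx
      rw [rleAux, if_pos rfl, ih x (c + 1) (by omega)]
      have : (c + 1).toNat = c.toNat + 1 := by omega
      rw [this, List.replicate_succ']
      simp
    · rw [rleAux, if_neg hx, flat, ih x 1 (by omega)]
      simp

lemma flat_rle (road : List Int) : flat (rle road) = road := by
  cases road with
  | nil => rfl
  | cons x t =>
    show flat (rleAux x 1 t) = x :: t
    rw [flat_rleAux t x 1 (by omega)]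
    simp

lemma rleAux_shape : ∀ (t : List Int) (h c : Int), 1 ≤ c →
    ∃ c' rs, rleAux h c t = (h, c') :: rs ∧ c ≤ c' ∧ runsOk h rs := by
  intro t
  induction t with
  | nil => intro h c hc; exact ⟨c, [], rfl, le_refl _, trivial⟩
  | cons x t ih =>
    intro h c hc
    by_cases hx : x = h
    · subst hx
      obtain ⟨c', rs, he, hle, hok⟩ := ih x (c + 1) (by omega)
      exact ⟨c', rs, by rw [rleAux, if_pos rfl]; exact he, by omega, hok⟩
    · obtain ⟨c', rs, he, hle, hok⟩ := ih x 1 (by omega)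
      refine ⟨c, (x, c') :: rs, ?_, le_refl _, hx, by omega, hok⟩
      rw [rleAux, if_neg hx, he]

-- ---- indexing into pre ++ replicate c h ++ rest ----
lemma getD_mid (pre : List Int) (h : Int) (c : Nat) (rest : List Int) (k : Int)
    (h1 : (pre.length : Int) ≤ k) (h2 : k < (pre.length : Int) + c) :
    PySem.List.pyGetD (pre ++ (List.replicate c h ++ rest)) k 0 = h := by
  have hk0 : 0 ≤ k := le_trans (by positivity) h1
  rw [PySem.List.pyGetD_eq_getElem _ 0 hk0 (by simp only [List.length_append, List.length_replicate]; push_cast; omega)]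
  have hp : pre.length ≤ k.toNat := by omega
  rw [List.getElem_append_right hp]
  rw [List.getElem_append_left (by simp only [List.length_replicate]; omega)]
  simp

lemma pyGetD_replicate_false (n : Nat) (k : Int) :
    PySem.List.pyGetD (List.replicate n false) k false = false := by
  simp only [PySem.List.pyGetD, PySem.List.pyGet?, List.getElem?_replicate]
  cases PySem.List.pyIdx? (List.replicate n false).length k with
  | none => rfl
  | some a =>
    simp only [Option.bind_some]
    split <;> rfl

-- pyGetD after used[j] = True, at a nonnegative index
lemma pyGetD_set (used : List Bool) (j k : Int) (hj0 : 0 ≤ j) (hjl : j < (used.length : Int))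
    (hk : 0 ≤ k) :
    PySem.List.pyGetD (used.set j.toNat true) k false
      = (if k = j then true else PySem.List.pyGetD used k false) := by
  rw [PySem.List.pyGetD_of_nonneg _ _ hk, PySem.List.pyGetD_of_nonneg _ _ hk,
    List.getD_eq_getElem?_getD, List.getD_eq_getElem?_getD, List.getElem?_set]
  by_cases hkj : k = j
  · subst hkj
    rw [if_pos rfl, if_pos (by omega), if_pos (by omega)]
    rfl
  · rw [if_neg (by omega), if_neg hkj]

-- setting a cell to True never turns a True lookup into False
lemma pyGetD_set_true_mono (used : List Bool) (m : Nat) (k : Int) (hk : 0 ≤ k)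
    (h : PySem.List.pyGetD used k false = true) :
    PySem.List.pyGetD (used.set m true) k false = true := by
  rw [PySem.List.pyGetD_of_nonneg _ _ hk, List.getD_eq_getElem?_getD, List.getElem?_set]
  rw [PySem.List.pyGetD_of_nonneg _ _ hk, List.getD_eq_getElem?_getD] at h
  by_cases hm : m = k.toNat
  · rw [if_pos hm]
    by_cases hl : m < used.length
    · rw [if_pos hl]; rfl
    · rw [if_neg hl]
      subst hm
      rw [List.getElem?_eq_none (by omega)] at h
      exact absurd h (by simp)
  · rw [if_neg hm]; exact h

-- ---- generic inner ramp loop ----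
def markStep (stat : Int → Bool) (st : Option (List Bool)) (j : Int) : Option (List Bool) :=
  match st with
  | none => none
  | some u =>
    if stat j ∨ PySem.List.pyGetD u j false = true then none
    else some (u.set j.toNat true)

lemma down_eq_mark (road : List Int) (n h2 : Int) :
    aDownStep road n h2 = markStep (fun j => decide (n ≤ j) || !(decide (PySem.List.pyGetD road j 0 = h2))) := by
  funext st j
  cases st with
  | none => rfl
  | some u =>
    simp only [aDownStep, markStep]
    by_cases h1 : n ≤ j <;> by_cases h3 : PySem.List.pyGetD road j 0 = h2 <;>
      by_cases h4 : PySem.List.pyGetD u j false = true <;> simp [h1, h3, h4]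

lemma up_eq_mark (road : List Int) (h1 : Int) :
    aUpStep road h1 = markStep (fun j => decide (j < 0) || !(decide (PySem.List.pyGetD road j 0 = h1))) := by
  funext st j
  cases st with
  | none => rfl
  | some u =>
    simp only [aUpStep, markStep]
    by_cases hc1 : j < 0 <;> by_cases h3 : PySem.List.pyGetD road j 0 = h1 <;>
      by_cases h4 : PySem.List.pyGetD u j false = true <;> simp [hc1, h3, h4]

lemma mark_fail (stat : Int → Bool) : ∀ (js : List Int) (used : List Bool)
    (j : Int) (hmem : j ∈ js)
    (hbad : stat j = true ∨ (0 ≤ j ∧ PySem.List.pyGetD used j false = true)),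
    js.foldl (markStep stat) (some used) = none := by
  intro js
  induction js with
  | nil => intro used j hmem _; exact absurd hmem (List.not_mem_nil)
  | cons x t ih =>
    intro used j hmem hbad
    rcases List.mem_cons.mp hmem with rfl | hj
    · show t.foldl (markStep stat) (markStep stat (some used) j) = none
      have hn : markStep stat (some used) j = none := by
        simp only [markStep]
        rw [if_pos]
        rcases hbad with hb | ⟨_, hb⟩
        · exact Or.inl hb
        · exact Or.inr hb
      rw [hn]
      exact foldl_none _ (fun _ => rfl) t
    · show t.foldl (markStep stat) (markStep stat (some used) x) = none
      cases hres : markStep stat (some used) x with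
      | none => exact foldl_none _ (fun _ => rfl) t
      | some u' =>
        have hu' : u' = used.set x.toNat true := by
          simp only [markStep] at hres
          by_cases hcond : stat x = true ∨ PySem.List.pyGetD used x false = true
          · rw [if_pos hcond] at hres; cases hres
          · rw [if_neg hcond] at hres; exact (Option.some.injEq _ _ ▸ hres).symm
        apply ih u' j hj
        rcases hbad with hb | ⟨hj0, hb⟩
        · exact Or.inl hb
        · exact Or.inr ⟨hj0, by rw [hu']; exact pyGetD_set_true_mono used x.toNat j hj0 hb⟩

lemma mark_succ (stat : Int → Bool) : ∀ (js : List Int) (used : List Bool)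
    (hnd : js.Nodup)
    (hgood : ∀ j ∈ js, 0 ≤ j ∧ j < (used.length : Int) ∧ stat j = false ∧
      PySem.List.pyGetD used j false = false),
    ∃ u', js.foldl (markStep stat) (some used) = some u' ∧ u'.length = used.length ∧
      ∀ k : Int, 0 ≤ k →
        PySem.List.pyGetD u' k false = (PySem.List.pyGetD used k false || decide (k ∈ js)) := by
  intro js
  induction js with
  | nil =>
    intro used _ _
    exact ⟨used, rfl, rfl, fun k _ => by simp⟩
  | cons x t ih =>
    intro used hnd hgood
    obtain ⟨hx0, hxl, hxs, hxu⟩ := hgood x List.mem_cons_self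
    have hstep : markStep stat (some used) x = some (used.set x.toNat true) := by
      simp only [markStep]
      rw [if_neg]
      push Not
      exact ⟨by simp [hxs], by simp [hxu]⟩
    have hgood' : ∀ j ∈ t, 0 ≤ j ∧ j < ((used.set x.toNat true).length : Int) ∧ stat j = false ∧
        PySem.List.pyGetD (used.set x.toNat true) j false = false := by
      intro j hj
      obtain ⟨hj0, hjl, hjs, hju⟩ := hgood j (List.mem_cons_of_mem x hj)
      have hne : j ≠ x := fun he => (List.nodup_cons.mp hnd).1 (he ▸ hj)
      refine ⟨hj0, by simpa using hjl, hjs, ?_⟩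
      rw [pyGetD_set used x j hx0 hxl hj0, if_neg hne]
      exact hju
    obtain ⟨u', hfold, hlen, hpt⟩ := ih (used.set x.toNat true) (List.nodup_cons.mp hnd).2 hgood'
    refine ⟨u', ?_, by simpa using hlen, ?_⟩
    · show t.foldl (markStep stat) (markStep stat (some used) x) = some u'
      rw [hstep]; exact hfold
    · intro k hk
      rw [hpt k hk, pyGetD_set used x k hx0 hxl hk]
      by_cases hkx : k = x
      · subst hkx
        simp
      · simp only [if_neg hkx]
        simp [List.mem_cons, hkx]

-- ---- the constant stretch of a run does nothing ----
lemma const_seg (road : List Int) (L : Int) : ∀ (m : Nat) (a b : Int), b - a ≤ m →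
    (∀ i, a ≤ i → i < b → PySem.List.pyGetD road i 0 = PySem.List.pyGetD road (i+1) 0) →
    ∀ used, (PySem.List.pyRange a b 1).foldl (aOuterStep road L) (some used) = some used := by
  intro m
  induction m with
  | zero =>
    intro a b hab _ used
    rw [PySem.List.pyRange_one_eq_nil (by omega)]
    rfl
  | succ m ih =>
    intro a b hab heq used
    rcases lt_or_ge a b with h | h
    · rw [PySem.List.pyRange_one_cons h]
      have hstep : aOuterStep road L (some used) a = some used := by
        simp only [aOuterStep]
        rw [if_pos (heq a (le_refl a) h)]
      simp only [List.foldl, hstep]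
      exact ih (a + 1) b (by omega) (fun i hi1 hi2 => heq i (by omega) hi2) used
    · rw [PySem.List.pyRange_one_eq_nil h]
      rfl

-- ---- main induction over the runs ----
lemma nodup_pyRange_neg_aux : ∀ (m : Nat) (a b : Int), a - b ≤ m → (PySem.List.pyRange a b (-1)).Nodup := by
  intro m
  induction m with
  | zero =>
    intro a b hab
    rw [PySem.List.pyRange_neg_one_eq_nil (by omega)]
    exact List.nodup_nil
  | succ m ih =>
    intro a b hab
    rcases lt_or_ge b a with hlt | hge
    · rw [PySem.List.pyRange_neg_one_cons hlt]
      refine List.nodup_cons.mpr ⟨?_, ih (a - 1) b (by omega)⟩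
      intro hmem
      have := PySem.List.mem_pyRange_neg_one.mp hmem
      omega
    · rw [PySem.List.pyRange_neg_one_eq_nil hge]
      exact List.nodup_nil

lemma nodup_pyRange_neg (a b : Int) : (PySem.List.pyRange a b (-1)).Nodup :=
  nodup_pyRange_neg_aux (a - b).toNat a b (by omega)

lemma A_main (road : List Int) (L : Int) : ∀ (rs : List (Int × Int)) (pre : List Int) (h c rem : Int)
    (used : List Bool)
    (hroad : road = pre ++ (List.replicate c.toNat h ++ flat rs))
    (hc : 1 ≤ c) (hok : runsOk h rs)
    (hrem : 0 ≤ rem) (hreml : rem ≤ c ∨ L ≤ 0)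
    (hlen : used.length = road.length)
    (hprev : (pre.length : Int) = 0 ∨ PySem.List.pyGetD road ((pre.length : Int) - 1) 0 ≠ h)
    (hused : ∀ k : Int, (pre.length : Int) ≤ k →
      (PySem.List.pyGetD used k false = decide (k < (pre.length : Int) + c - rem))),
    ((PySem.List.pyRange (pre.length : Int) ((road.length : Int) - 1) 1).foldl
      (aOuterStep road L) (some used)).isSome = chk L h rem rs := by
  intro rs
  induction rs with
  | nil =>
    intro pre h c rem used hroad hc hok hrem hreml hlen hprev hused
    have hn : (road.length : Int) = pre.length + c := by
      rw [hroad]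
      simp only [flat, List.length_append, List.length_replicate, List.length_nil]
      push_cast
      omega
    rw [const_seg road L ((road.length : Int) - 1 - pre.length).toNat (pre.length : Int)
      ((road.length : Int) - 1) (by omega) ?_ used]
    · rfl
    · intro i hi1 hi2
      rw [hroad, getD_mid pre h c.toNat (flat []) i hi1 (by omega),
        getD_mid pre h c.toNat (flat []) (i + 1) (by omega) (by omega)]
  | cons p rs' ih =>
    obtain ⟨h2, l2⟩ := p
    intro pre h c rem used hroad hc hok hrem hreml hlen hprev hused
    obtain ⟨hne, hl2, hok'⟩ := hok
    have hcc : (c.toNat : Int) = c := by omega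
    have hl2c : (l2.toNat : Int) = l2 := by omega
    have hroad' : road = (pre ++ List.replicate c.toNat h) ++ (List.replicate l2.toNat h2 ++ flat rs') := by
      rw [hroad]
      simp [flat, List.append_assoc]
    have hn : (road.length : Int) = pre.length + c + l2 + (flat rs').length := by
      rw [hroad]
      simp only [flat, List.length_append, List.length_replicate]
      push_cast
      omega
    have hfl : (0 : Int) ≤ ((flat rs').length : Int) := by positivity
    have hlenZ : (used.length : Int) = (road.length : Int) := by exact_mod_cast congrArg Nat.cast hlen
    have hi_lt : (pre.length : Int) + c - 1 < (road.length : Int) - 1 := by omega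
    rw [PySem.List.pyRange_one_append (pre.length : Int) ((pre.length : Int) + c - 1)
      ((road.length : Int) - 1) (by omega) (by omega), List.foldl_append]
    rw [const_seg road L (c - 1).toNat (pre.length : Int) ((pre.length : Int) + c - 1) (by omega)
      (fun i hi1 hi2 => by
        rw [hroad, getD_mid pre h c.toNat _ i hi1 (by omega),
          getD_mid pre h c.toNat _ (i + 1) (by omega) (by omega)]) used]
    rw [PySem.List.pyRange_one_cons hi_lt, List.foldl_cons]
    have hroadi : PySem.List.pyGetD road ((pre.length : Int) + c - 1) 0 = h := by
      rw [hroad]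
      exact getD_mid pre h c.toNat _ _ (by omega) (by omega)
    have hroadi1 : PySem.List.pyGetD road ((pre.length : Int) + c - 1 + 1) 0 = h2 := by
      rw [hroad']
      have := getD_mid (pre ++ List.replicate c.toNat h) h2 l2.toNat (flat rs')
        ((pre.length : Int) + c) (by simp only [List.length_append, List.length_replicate]; push_cast; omega)
        (by simp only [List.length_append, List.length_replicate]; push_cast; omega)
      rw [show (pre.length : Int) + c - 1 + 1 = (pre.length : Int) + c from by ring]
      exact this
    by_cases hup : h2 = h + 1
    · -- uphill boundary
      have hstep : aOuterStep road L (some used) ((pre.length : Int) + c - 1)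
          = (PySem.List.pyRange ((pre.length : Int) + c - 1) ((pre.length : Int) + c - 1 - L) (-1)).foldl
              (aUpStep road h) (some used) := by
        simp only [aOuterStep, hroadi, hroadi1]
        rw [if_neg (show ¬ (h = h2) from fun e => hne e.symm),
          if_neg (show ¬ 1 < |h - h2| by rw [hup, show h - (h + 1) = -1 from by ring]; norm_num),
          if_neg (show ¬ h2 < h by omega)]
      rw [hstep, up_eq_mark, chk, if_pos hup]
      by_cases hr : rem < L
      · rw [if_pos hr]
        have hremc : rem ≤ c := by rcases hreml with h' | h' <;> omega
        have hfail := mark_fail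
          (fun j => decide (j < 0) || !(decide (PySem.List.pyGetD road j 0 = h)))
          (PySem.List.pyRange ((pre.length : Int) + c - 1) ((pre.length : Int) + c - 1 - L) (-1))
          used ((pre.length : Int) + c - 1 - rem)
          (PySem.List.mem_pyRange_neg_one.mpr ⟨by omega, by omega⟩) ?_
        · rw [hfail, foldl_none _ (fun _ => rfl)]
          rfl
        · by_cases hrc : rem = c
          · left
            rcases hprev with hz | hnz
            · have : (pre.length : Int) + c - 1 - rem < 0 := by omega
              simp [this]
            · have hidx : (pre.length : Int) + c - 1 - rem = (pre.length : Int) - 1 := by omega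
              rw [hidx]
              simp [hnz]
          · right
            refine ⟨by omega, ?_⟩
            rw [hused _ (by omega)]
            simp
      · rw [if_neg hr]
        have hLr : L ≤ rem := by omega
        have hgood : ∀ j ∈ PySem.List.pyRange ((pre.length : Int) + c - 1)
            ((pre.length : Int) + c - 1 - L) (-1),
            0 ≤ j ∧ j < (used.length : Int) ∧
            (decide (j < 0) || !(decide (PySem.List.pyGetD road j 0 = h))) = false ∧
            PySem.List.pyGetD used j false = false := by
          intro j hj
          have hjb := PySem.List.mem_pyRange_neg_one.mp hj
          have hremc : rem ≤ c := by rcases hreml with h' | h' <;> omega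
          have hj0 : 0 ≤ j := by omega
          refine ⟨hj0, by omega, ?_, ?_⟩
          · rw [hroad, getD_mid pre h c.toNat _ j (by omega) (by omega)]
            simp [hj0]
          · rw [hused j (by omega)]
            simp
            omega
        obtain ⟨u', hfold, hlen', hpt⟩ := mark_succ
          (fun j => decide (j < 0) || !(decide (PySem.List.pyGetD road j 0 = h)))
          (PySem.List.pyRange ((pre.length : Int) + c - 1) ((pre.length : Int) + c - 1 - L) (-1))
          used (nodup_pyRange_neg _ _) hgood
        rw [hfold]
        have hmain := ih (pre ++ List.replicate c.toNat h) h2 l2 l2 u' hroad' hl2 hok'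
          (by omega) (Or.inl (le_refl _))
          (by rw [hlen']; exact hlen)
          (Or.inr (by
            simp only [List.length_append, List.length_replicate]
            push_cast
            rw [show (pre.length : Int) + (c.toNat : Int) - 1 = (pre.length : Int) + c - 1 from by omega]
            rw [hroadi]
            omega))
          (fun k hk => by
            have hk' : (pre.length : Int) + c ≤ k := by
              simp only [List.length_append, List.length_replicate] at hk
              push_cast at hk
              omega
            rw [hpt k (by omega), hused k (by omega)]
            have e1 : decide (k < (pre.length : Int) + c - rem) = false := by simp; omega
            have e2 : decide (k ∈ PySem.List.pyRange ((pre.length : Int) + c - 1)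
                ((pre.length : Int) + c - 1 - L) (-1)) = false := by
              simp [PySem.List.mem_pyRange_neg_one]
              omega
            rw [e1, e2, Bool.or_self, eq_comm, decide_eq_false_iff_not]
            push_cast [List.length_append, List.length_replicate]
            omega)
        have hlen2 : (((pre ++ List.replicate c.toNat h).length : Nat) : Int) = (pre.length : Int) + c := by
          push_cast [List.length_append, List.length_replicate]
          omega
        rw [hlen2] at hmain
        rw [show (pre.length : Int) + c - 1 + 1 = (pre.length : Int) + c from by ring]
        exact hmain
    · by_cases hdn : h2 = h - 1
      · -- downhill boundary
        have hstep : aOuterStep road L (some used) ((pre.length : Int) + c - 1)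
            = (PySem.List.pyRange ((pre.length : Int) + c - 1 + 1) ((pre.length : Int) + c - 1 + 1 + L) 1).foldl
                (aDownStep road road.length h2) (some used) := by
          simp only [aOuterStep, hroadi, hroadi1]
          rw [if_neg (show ¬ (h = h2) from fun e => hne e.symm),
            if_neg (show ¬ 1 < |h - h2| by rw [hdn, show h - (h - 1) = 1 from by ring]; norm_num),
            if_pos (show h2 < h by omega)]
        rw [hstep, down_eq_mark, chk, if_neg hup, if_pos hdn]
        by_cases hl : l2 < L
        · rw [if_pos hl]
          have hfail := mark_fail
            (fun j => decide ((road.length : Int) ≤ j) || !(decide (PySem.List.pyGetD road j 0 = h2)))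
            (PySem.List.pyRange ((pre.length : Int) + c - 1 + 1) ((pre.length : Int) + c - 1 + 1 + L) 1)
            used ((pre.length : Int) + c + l2)
            (PySem.List.mem_pyRange_one.mpr ⟨by omega, by omega⟩) ?_
          · rw [hfail, foldl_none _ (fun _ => rfl)]
            rfl
          · left
            cases rs' with
            | nil =>
              have : (road.length : Int) ≤ (pre.length : Int) + c + l2 := by
                rw [hn]
                simp [flat]
              simp [this]
            | cons q rs'' =>
              obtain ⟨h3, l3⟩ := q
              obtain ⟨hne3, hl3, _⟩ := hok'
              have hroad'' : road = ((pre ++ List.replicate c.toNat h) ++ List.replicate l2.toNat h2)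
                  ++ (List.replicate l3.toNat h3 ++ flat rs'') := by
                rw [hroad]
                simp [flat, List.append_assoc]
              have : PySem.List.pyGetD road ((pre.length : Int) + c + l2) 0 = h3 := by
                rw [hroad'']
                exact getD_mid _ h3 l3.toNat _ _
                  (by simp only [List.length_append, List.length_replicate]; push_cast; omega)
                  (by simp only [List.length_append, List.length_replicate]; push_cast; omega)
              simp [this, hne3]
        · rw [if_neg hl]
          have hgood : ∀ j ∈ PySem.List.pyRange ((pre.length : Int) + c - 1 + 1)
              ((pre.length : Int) + c - 1 + 1 + L) 1,
              0 ≤ j ∧ j < (used.length : Int) ∧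
              (decide ((road.length : Int) ≤ j) || !(decide (PySem.List.pyGetD road j 0 = h2))) = false ∧
              PySem.List.pyGetD used j false = false := by
            intro j hj
            have hjb := PySem.List.mem_pyRange_one.mp hj
            have hj0 : 0 ≤ j := by omega
            refine ⟨hj0, by omega, ?_, ?_⟩
            · have : PySem.List.pyGetD road j 0 = h2 := by
                rw [hroad']
                exact getD_mid _ h2 l2.toNat _ j
                  (by simp only [List.length_append, List.length_replicate]; push_cast; omega)
                  (by simp only [List.length_append, List.length_replicate]; push_cast; omega)
              rw [this]
              simp
              omega
            · rw [hused j (by omega)]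
              simp
              omega
          obtain ⟨u', hfold, hlen', hpt⟩ := mark_succ
            (fun j => decide ((road.length : Int) ≤ j) || !(decide (PySem.List.pyGetD road j 0 = h2)))
            (PySem.List.pyRange ((pre.length : Int) + c - 1 + 1) ((pre.length : Int) + c - 1 + 1 + L) 1)
            used (PySem.List.nodup_pyRange_one _ _) hgood
          rw [hfold]
          have hmain := ih (pre ++ List.replicate c.toNat h) h2 l2 (l2 - L) u' hroad' hl2 hok'
            (by omega)
            (by by_cases h' : 0 ≤ L
                · exact Or.inl (by omega)
                · exact Or.inr (by omega))
            (by rw [hlen']; exact hlen)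
            (Or.inr (by
              simp only [List.length_append, List.length_replicate]
              push_cast
              rw [show (pre.length : Int) + (c.toNat : Int) - 1 = (pre.length : Int) + c - 1 from by omega]
              rw [hroadi]
              omega))
            (fun k hk => by
              have hk' : (pre.length : Int) + c ≤ k := by
                simp only [List.length_append, List.length_replicate] at hk
                push_cast at hk
                omega
              rw [hpt k (by omega), hused k (by omega)]
              have e1 : decide (k < (pre.length : Int) + c - rem) = false := by simp; omega
              rw [e1, Bool.false_or, decide_eq_decide]
              simp only [List.length_append, List.length_replicate]
              push_cast
              rw [PySem.List.mem_pyRange_one]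
              omega)
          have hlen2 : (((pre ++ List.replicate c.toNat h).length : Nat) : Int) = (pre.length : Int) + c := by
            push_cast [List.length_append, List.length_replicate]
            omega
          rw [hlen2] at hmain
          rw [show (pre.length : Int) + c - 1 + 1 = (pre.length : Int) + c from by ring]
          exact hmain
      · -- height difference greater than 1
        have hstep : aOuterStep road L (some used) ((pre.length : Int) + c - 1) = none := by
          simp only [aOuterStep, hroadi, hroadi1]
          rw [if_neg (show ¬ (h = h2) from fun e => hne e.symm),
            if_pos (show 1 < |h - h2| by
              rcases abs_cases (h - h2) with ⟨he, _⟩ | ⟨he, _⟩ <;> omega)]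
        rw [hstep, foldl_none _ (fun _ => rfl), chk, if_neg hup, if_neg hdn]
        rfl

-- ===== VERDICT (by name: the statement is the Claim_ definition above) =====
theorem can_slope_spec : Claim_equal_can_slope := by
  intro road L _
  unfold Spec_can_slope
  rw [alt_eq_chk]
  cases road with
  | nil => rfl
  | cons x t =>
    obtain ⟨c', rs, he, hle, hok⟩ := rleAux_shape t x 1 (by omega)
    have h1 : rle (x :: t) = (x, c') :: rs := he
    have hflat : x :: t = [] ++ (List.replicate c'.toNat x ++ flat rs) := by
      have h2 := flat_rle (x :: t)
      rw [h1, flat] at h2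
      rw [← h2]
      rfl
    rw [h1]
    have hmain := A_main (x :: t) L rs [] x c' c' (List.replicate (x :: t).length false)
      hflat (by omega) hok (by omega) (Or.inl (le_refl _))
      (by simp) (Or.inl rfl)
      (fun k hk => by
        rw [pyGetD_replicate_false]
        symm
        simp only [List.length_nil, Nat.cast_zero]
        simp
        omega)
    simpa [can_slope] using hmain
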